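-- pv_equiv track=rewrite | github.com/Jakeminator123/promethius | queries/hand_strength.py | _detect_draws
-- ===== SOURCE A (Python) =====
-- from typing import Dict, List, Optional
--
-- RANKS = {r: i for i, r in enumerate("..23456789TJQKA", 0)}
--
-- def _detect_draws(hole: str, board: str) -> Dict[str, bool]:
--     """Detect flush and straight draws"""
--     all_cards = [hole[i:i+2] for i in range(0, len(hole), 2)] + \
--                 [board[i:i+2] for i in range(0, len(board), 2)]
--
--     # Count suits for flush draws
--     suits: Dict[str, int] = {}
--     for c in all_cards:
--         if len(c) == 2:
--             suits[c[1]] = suits.get(c[1], 0) + 1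
--
--     flush_draw = any(v == 4 for v in suits.values())
--     backdoor_flush = any(v == 3 for v in suits.values())
--
--     # Check for straight draws
--     ranks = sorted({RANKS[c[0]] for c in all_cards if len(c) == 2})
--     open_ended = gutshot = False
--
--     for i in range(len(ranks) - 3):
--         span = ranks[i + 3] - ranks[i]
--         if span == 3 and len(set(ranks[i:i+4])) == 4:
--             open_ended = True
--         elif span == 4:
--             gutshot = True
--
--     return {
--         "flush": flush_draw,
--         "backdoor": backdoor_flush,
--         "open_ended": open_ended,
--         "gutshot": gutshot
--     }
-- ===== SOURCE B (Python) =====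
-- from typing import Dict
--
-- RANKS = {r: i for i, r in enumerate("..23456789TJQKA", 0)}
--
-- def _detect_draws(hole: str, board: str) -> Dict[str, bool]:
--     """Detect flush and straight draws (presence-scan reformulation)"""
--     cards = [s[i:i+2] for s in (hole, board) for i in range(0, len(s), 2)]
--     cards = [c for c in cards if len(c) == 2]
--
--     suit_counts: Dict[str, int] = {}
--     for c in cards:
--         suit_counts[c[1]] = suit_counts.get(c[1], 0) + 1
--     counts = suit_counts.values()
--
--     present = {RANKS[c[0]] for c in cards}
--     open_ended = any(all(r + k in present for k in range(4)) for r in range(1, 12))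
--     gutshot = any(r in present and r + 4 in present
--                   and sum(k in present for k in (r + 1, r + 2, r + 3)) == 2
--                   for r in range(1, 11))
--
--     return {
--         "flush": 4 in counts,
--         "backdoor": 3 in counts,
--         "open_ended": open_ended,
--         "gutshot": gutshot
--     }
-- ===== Notes on version B (the rewrite author's own statement) =====
-- stated objective: alternative
-- what changed: B replaces A's sort-the-distinct-ranks-and-slide-a-window straight detection by a presence-set scan over the fixed rank-value range (open-ended: four consecutive ranks present; gutshot: endpoints r and r+4 present with exactly one interior rank absent), and filters the incomplete card chunks once up front instead of guarding each loop.
import Mathlib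
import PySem

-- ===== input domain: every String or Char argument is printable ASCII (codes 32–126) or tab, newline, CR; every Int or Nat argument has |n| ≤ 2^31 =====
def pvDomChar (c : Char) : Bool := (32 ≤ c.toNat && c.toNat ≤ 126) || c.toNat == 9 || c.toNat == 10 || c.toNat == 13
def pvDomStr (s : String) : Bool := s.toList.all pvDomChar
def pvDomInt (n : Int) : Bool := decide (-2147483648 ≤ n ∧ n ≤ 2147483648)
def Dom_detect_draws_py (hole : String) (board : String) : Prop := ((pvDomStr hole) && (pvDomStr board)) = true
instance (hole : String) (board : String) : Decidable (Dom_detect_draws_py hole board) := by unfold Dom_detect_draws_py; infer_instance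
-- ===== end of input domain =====

-- B replaces A's sort-and-slide window scan over the sorted distinct ranks by a direct presence-set scan
-- over the fixed rank-value range (objective: alternative decomposition, same asymptotic cost).

-- ===== PORT A =====

-- shared module constant: RANKS = {r: i for i, r in enumerate("..23456789TJQKA", 0)}
def RANKS_py : PySem.Dict Char Int :=
  (PySem.List.enumerate ("..23456789TJQKA".toList) 0).foldl
    (fun d p => d.insert p.2 p.1) PySem.Dict.empty

-- [s[i:i+2] for i in range(0, len(s), 2)]  (shared chunking expression of both Pythons)
def pvChunks (s : List Char) : List (List Char) :=
  (PySem.List.pyRange 0 (PySem.List.len s) 2).map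
    (fun i => PySem.List.slice s (some i) (some (i + 2)))

-- span = ranks[i+3] - ranks[i]
def pvSpan (L : List Int) (i : Int) : Int :=
  PySem.List.pyGetD L (i + 3) 0 - PySem.List.pyGetD L i 0

-- span == 3 and len(set(ranks[i:i+4])) == 4
def pvCondOpen (L : List Int) (i : Int) : Bool :=
  pvSpan L i == 3 &&
    (PySem.Set.ofList (PySem.List.slice L (some i) (some (i + 4)))).length == 4

-- span == 4
def pvCondGut (L : List Int) (i : Int) : Bool := pvSpan L i == 4

def detect_draws_py (hole : String) (board : String) : List (String × Bool) :=
  let all_cards : List (List Char) := pvChunks hole.toList ++ pvChunks board.toList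
  let suits : PySem.Dict Char Int :=
    all_cards.foldl (fun d c =>
      if c.length == 2 then
        d.insert (PySem.List.pyGetD c 1 ' ') (d.getD (PySem.List.pyGetD c 1 ' ') 0 + 1)
      else d) PySem.Dict.empty
  let flush_draw := suits.values.any (fun v => v == 4)
  let backdoor_flush := suits.values.any (fun v => v == 3)
  let ranks : List Int :=
    PySem.List.sorted
      (PySem.Set.ofList ((all_cards.filter (fun c => c.length == 2)).map
        (fun c => RANKS_py.getD (PySem.List.pyGetD c 0 ' ') 0)))
      (fun x => x) false
  let loop :=
    (PySem.List.pyRange 0 (PySem.List.len ranks - 3) 1).foldl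
      (fun (st : Bool × Bool) i =>
        if pvCondOpen ranks i then (true, st.2)
        else if pvCondGut ranks i then (st.1, true)
        else st)
      (false, false)
  [("flush", flush_draw), ("backdoor", backdoor_flush),
   ("open_ended", loop.1), ("gutshot", loop.2)]

-- ===== PORT B =====
def detect_draws_py_alt (hole : String) (board : String) : List (String × Bool) :=
  let cards0 : List (List Char) := [hole.toList, board.toList].flatMap pvChunks
  let cards : List (List Char) := cards0.filter (fun c => c.length == 2)
  let suit_counts : PySem.Dict Char Int :=
    cards.foldl (fun d c =>
      d.insert (PySem.List.pyGetD c 1 ' ') (d.getD (PySem.List.pyGetD c 1 ' ') 0 + 1))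
      PySem.Dict.empty
  let counts : List Int := suit_counts.values
  let present : PySem.Set Int :=
    PySem.Set.ofList (cards.map (fun c => RANKS_py.getD (PySem.List.pyGetD c 0 ' ') 0))
  let open_ended :=
    (PySem.List.pyRange 1 12 1).any (fun r =>
      (PySem.List.pyRange 0 4 1).all (fun k => PySem.Set.contains present (r + k)))
  let gutshot :=
    (PySem.List.pyRange 1 11 1).any (fun r =>
      PySem.Set.contains present r && PySem.Set.contains present (r + 4) &&
        ((([r + 1, r + 2, r + 3] : List Int).map
            (fun k => if PySem.Set.contains present k then (1 : Int) else 0)).sum == 2))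
  [("flush", counts.contains 4), ("backdoor", counts.contains 3),
   ("open_ended", open_ended), ("gutshot", gutshot)]

-- ===== PRECONDITION & SPEC =====
-- Pre_ excludes exactly the inputs where some complete 2-character card's rank character is not a
-- key of RANKS, on which Python A raises KeyError (B raises there too).
def Pre_detect_draws_py (hole : String) (board : String) : Prop :=
  ∀ c ∈ pvChunks hole.toList ++ pvChunks board.toList,
    c.length = 2 → PySem.List.pyGetD c 0 ' ' ∈ ".23456789TJQKA".toList
instance (hole : String) (board : String) : Decidable (Pre_detect_draws_py hole board) := by
  unfold Pre_detect_draws_py; infer_instance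

def pvWitness_detect_draws_py : String × String := ("AhKh", "QsJs9d")

def Spec_detect_draws_py (hole : String) (board : String) (out : List (String × Bool)) : Prop := out = detect_draws_py_alt hole board
instance (hole : String) (board : String) (out : List (String × Bool)) : Decidable (Spec_detect_draws_py hole board out) := by unfold Spec_detect_draws_py; infer_instance

-- ===== CLAIM (what is proved, stated in full; the proofs are below) =====
def Claim_equal_detect_draws_py : Prop := ∀ (hole : String) (board : String), Dom_detect_draws_py hole board → Pre_detect_draws_py hole board → Spec_detect_draws_py hole board (detect_draws_py hole board)

-- ===== LEMMAS AND PROOFS =====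

-- A window of A's sorted scan: four sorted-consecutive entries spanning s.
def pvAWin (L : List Int) (s : Int) : Prop :=
  ∃ k : Nat, ∃ h : k + 3 < L.length,
    L[k + 3]'h = L[k]'(Nat.lt_of_le_of_lt (by omega) h) + s

-- A's two-flag loop is two independent 'any's.
lemma pv_fold_two (l : List Int) (p q : Int → Bool) (o g : Bool) :
    l.foldl (fun (st : Bool × Bool) i =>
        if p i then (true, st.2) else if q i then (st.1, true) else st) (o, g)
      = (o || l.any p, g || l.any (fun i => !p i && q i)) := by
  induction l generalizing o g with
  | nil => simp
  | cons x xs ih =>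
    by_cases hp : p x <;> by_cases hq : q x <;>
      simp [hp, hq, ih]

lemma pv_strict {L : List Int} (hlt : L.Pairwise (· < ·)) {i j : Nat}
    (hij : i < j) (hj : j < L.length) : L[i]'(by omega) < L[j]'hj :=
  List.pairwise_iff_getElem.mp hlt i j (by omega) hj hij

lemma pv_mono {L : List Int} (hlt : L.Pairwise (· < ·)) {i j : Nat}
    (hij : i ≤ j) (hj : j < L.length) : L[i]'(by omega) ≤ L[j]'hj := by
  rcases Nat.lt_or_ge i j with h | h
  · exact le_of_lt (pv_strict hlt h hj)
  · have : i = j := by omega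
    subst this; exact le_refl _

lemma pv_gap {L : List Int} (hlt : L.Pairwise (· < ·)) (k d : Nat)
    (h : k + d < L.length) : L[k]'(by omega) + d ≤ L[k + d]'h := by
  induction d with
  | zero => simp
  | succ d ih =>
    have h' : k + d < L.length := by omega
    have h1 := ih h'
    have h2 : L[k + d]'h' < L[k + d + 1]'h := pv_strict hlt (by omega) h
    show L[k]'(by omega) + ((d + 1 : Nat) : Int) ≤ L[k + d + 1]'h
    push_cast
    omega

lemma pv_idx {L : List Int} (hlt : L.Pairwise (· < ·)) {i j : Nat}
    (hi : i < L.length) (hj : j < L.length) (hv : L[i] < L[j]) : i < j := by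
  by_contra hc
  have : L[j]'hj ≤ L[i]'hi := pv_mono hlt (by omega) hi
  omega

-- open-ended: A's window ↔ four consecutive present ranks
lemma pv_open_iff {L : List Int} (hlt : L.Pairwise (· < ·))
    (hb : ∀ x ∈ L, 1 ≤ x ∧ x ≤ 14) :
    pvAWin L 3 ↔ ∃ r : Int, 1 ≤ r ∧ r < 12 ∧
      r ∈ L ∧ r + 1 ∈ L ∧ r + 2 ∈ L ∧ r + 3 ∈ L := by
  constructor
  · rintro ⟨k, h, he⟩
    have hk : k < L.length := by omega
    have hk1 : k + 1 < L.length := by omega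
    have hk2 : k + 2 < L.length := by omega
    have g1 : L[k]'hk + ((1 : Nat) : Int) ≤ L[k + 1]'hk1 := pv_gap hlt k 1 hk1
    have g2 : L[k + 1]'hk1 + ((2 : Nat) : Int) ≤ L[k + 3]'h := pv_gap hlt (k + 1) 2 h
    have g3 : L[k]'hk + ((2 : Nat) : Int) ≤ L[k + 2]'hk2 := pv_gap hlt k 2 hk2
    have g4 : L[k + 2]'hk2 + ((1 : Nat) : Int) ≤ L[k + 3]'h := pv_gap hlt (k + 2) 1 h
    push_cast at g1 g2 g3 g4
    have e1 : L[k + 1]'hk1 = L[k]'hk + 1 := by omega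
    have e2 : L[k + 2]'hk2 = L[k]'hk + 2 := by omega
    refine ⟨L[k]'hk, (hb _ (L.getElem_mem hk)).1, ?_, L.getElem_mem hk, ?_, ?_, ?_⟩
    · have h14 := (hb _ (L.getElem_mem h)).2
      omega
    · rw [← e1]; exact L.getElem_mem hk1
    · rw [← e2]; exact L.getElem_mem hk2
    · rw [← he]; exact L.getElem_mem h
  · rintro ⟨r, -, -, h0, h1, h2, h3⟩
    obtain ⟨j0, hj0, e0⟩ := List.mem_iff_getElem.mp h0
    obtain ⟨j1, hj1, e1⟩ := List.mem_iff_getElem.mp h1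
    obtain ⟨j2, hj2, e2⟩ := List.mem_iff_getElem.mp h2
    obtain ⟨j3, hj3, e3⟩ := List.mem_iff_getElem.mp h3
    have o01 : j0 < j1 := pv_idx hlt hj0 hj1 (by rw [e0, e1]; omega)
    have o12 : j1 < j2 := pv_idx hlt hj1 hj2 (by rw [e1, e2]; omega)
    have o23 : j2 < j3 := pv_idx hlt hj2 hj3 (by rw [e2, e3]; omega)
    have hlen : j0 + 3 < L.length := by omega
    refine ⟨j0, hlen, ?_⟩
    have gg : L[j0]'(by omega) + ((3 : Nat) : Int) ≤ L[j0 + 3]'hlen := pv_gap hlt j0 3 hlen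
    have mm : L[j0 + 3]'hlen ≤ L[j3]'hj3 := pv_mono hlt (by omega) hj3
    push_cast at gg
    rw [e3] at mm
    rw [e0] at gg ⊢
    omega

-- a strictly sorted list with endpoints r, r+4 present, two interior values present and one
-- interior value absent has a window of four consecutive entries spanning 4
lemma pv_gut_back {L : List Int} (hlt : L.Pairwise (· < ·)) (r a b : Int)
    (h0 : r ∈ L) (h4 : r + 4 ∈ L) (haL : a ∈ L) (hbL : b ∈ L)
    (hra : r < a) (hab : a < b) (hbr : b < r + 4)
    (hmiss : ∃ c, r < c ∧ c < r + 4 ∧ c ∉ L) : pvAWin L 4 := by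
  obtain ⟨j0, hj0, e0⟩ := List.mem_iff_getElem.mp h0
  obtain ⟨ja, hja, ea⟩ := List.mem_iff_getElem.mp haL
  obtain ⟨jb, hjb, eb⟩ := List.mem_iff_getElem.mp hbL
  obtain ⟨j4, hj4, e4⟩ := List.mem_iff_getElem.mp h4
  have o1 : j0 < ja := pv_idx hlt hj0 hja (by rw [e0, ea]; exact hra)
  have o2 : ja < jb := pv_idx hlt hja hjb (by rw [ea, eb]; exact hab)
  have o3 : jb < j4 := pv_idx hlt hjb hj4 (by rw [eb, e4]; exact hbr)
  by_cases hc : j0 + 3 < j4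
  · exfalso
    obtain ⟨c, hc1, hc2, hcn⟩ := hmiss
    have k1 : j0 + 1 < L.length := by omega
    have k2 : j0 + 2 < L.length := by omega
    have k3 : j0 + 3 < L.length := by omega
    have sa : L[j0]'hj0 < L[j0 + 1]'k1 := pv_strict hlt (by omega) k1
    have sb : L[j0 + 1]'k1 < L[j0 + 2]'k2 := pv_strict hlt (by omega) k2
    have sc : L[j0 + 2]'k2 < L[j0 + 3]'k3 := pv_strict hlt (by omega) k3
    have sd : L[j0 + 3]'k3 < L[j4]'hj4 := pv_strict hlt (by omega) hj4
    rw [e0] at sa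
    rw [e4] at sd
    have v1 : L[j0 + 1]'k1 = r + 1 := by omega
    have v2 : L[j0 + 2]'k2 = r + 2 := by omega
    have v3 : L[j0 + 3]'k3 = r + 3 := by omega
    have hcv : c = r + 1 ∨ c = r + 2 ∨ c = r + 3 := by omega
    rcases hcv with rfl | rfl | rfl
    · exact hcn (v1 ▸ L.getElem_mem k1)
    · exact hcn (v2 ▸ L.getElem_mem k2)
    · exact hcn (v3 ▸ L.getElem_mem k3)
  · have hj : j0 + 3 = j4 := by omega
    refine ⟨j0, by omega, ?_⟩
    rw [getElem_congr_idx hj, e4, e0]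

-- gutshot: A's window ↔ endpoints present, exactly two of the three interior ranks present
lemma pv_gut_iff {L : List Int} (hlt : L.Pairwise (· < ·))
    (hb : ∀ x ∈ L, 1 ≤ x ∧ x ≤ 14) :
    pvAWin L 4 ↔ ∃ r : Int, 1 ≤ r ∧ r < 11 ∧ r ∈ L ∧ r + 4 ∈ L ∧
      ((if r + 1 ∈ L then (1:Int) else 0) + ((if r + 2 ∈ L then (1:Int) else 0)
        + (if r + 3 ∈ L then (1:Int) else 0)) = 2) := by
  constructor
  · rintro ⟨k, h, he⟩
    have hk : k < L.length := by omega
    have hk1 : k + 1 < L.length := by omega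
    have hk2 : k + 2 < L.length := by omega
    have s1 : L[k]'hk < L[k + 1]'hk1 := pv_strict hlt (by omega) hk1
    have s2 : L[k + 1]'hk1 < L[k + 2]'hk2 := pv_strict hlt (by omega) hk2
    have s3 : L[k + 2]'hk2 < L[k + 3]'h := pv_strict hlt (by omega) h
    have char : ∀ v, v ∈ L → L[k]'hk < v → v < L[k]'hk + 4 →
        v = L[k + 1]'hk1 ∨ v = L[k + 2]'hk2 := by
      intro v hv hv1 hv2
      obtain ⟨m, hm, em⟩ := List.mem_iff_getElem.mp hv
      have m1 : k < m := pv_idx hlt hk hm (by rw [em]; exact hv1)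
      have m2 : m < k + 3 := pv_idx hlt hm h (by rw [em, he]; exact hv2)
      have : m = k + 1 ∨ m = k + 2 := by omega
      rcases this with rfl | rfl
      · exact Or.inl em.symm
      · exact Or.inr em.symm
    refine ⟨L[k]'hk, (hb _ (L.getElem_mem hk)).1, ?_, L.getElem_mem hk, ?_, ?_⟩
    · have h14 := (hb _ (L.getElem_mem h)).2
      omega
    · rw [← he]; exact L.getElem_mem h
    · have haL := L.getElem_mem hk1
      have hbL := L.getElem_mem hk2
      have hcase : (L[k + 1]'hk1 = L[k]'hk + 1 ∧ L[k + 2]'hk2 = L[k]'hk + 2) ∨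
          (L[k + 1]'hk1 = L[k]'hk + 1 ∧ L[k + 2]'hk2 = L[k]'hk + 3) ∨
          (L[k + 1]'hk1 = L[k]'hk + 2 ∧ L[k + 2]'hk2 = L[k]'hk + 3) := by omega
      rcases hcase with ⟨ea, eb⟩ | ⟨ea, eb⟩ | ⟨ea, eb⟩
      · have m1 : L[k]'hk + 1 ∈ L := ea ▸ haL
        have m2 : L[k]'hk + 2 ∈ L := eb ▸ hbL
        have m3 : ¬(L[k]'hk + 3 ∈ L) := by
          intro hv
          rcases char _ hv (by omega) (by omega) with hx | hx <;> omega
        rw [if_pos m1, if_pos m2, if_neg m3]; norm_num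
      · have m1 : L[k]'hk + 1 ∈ L := ea ▸ haL
        have m3 : L[k]'hk + 3 ∈ L := eb ▸ hbL
        have m2 : ¬(L[k]'hk + 2 ∈ L) := by
          intro hv
          rcases char _ hv (by omega) (by omega) with hx | hx <;> omega
        rw [if_pos m1, if_neg m2, if_pos m3]; norm_num
      · have m2 : L[k]'hk + 2 ∈ L := ea ▸ haL
        have m3 : L[k]'hk + 3 ∈ L := eb ▸ hbL
        have m1 : ¬(L[k]'hk + 1 ∈ L) := by
          intro hv
          rcases char _ hv (by omega) (by omega) with hx | hx <;> omega
        rw [if_neg m1, if_pos m2, if_pos m3]; norm_num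
  · rintro ⟨r, -, -, h0, h4, hsum⟩
    by_cases p1 : r + 1 ∈ L <;> by_cases p2 : r + 2 ∈ L <;> by_cases p3 : r + 3 ∈ L
    · exfalso; norm_num [p1, p2, p3] at hsum
    · exact pv_gut_back hlt r (r + 1) (r + 2) h0 h4 p1 p2 (by omega) (by omega) (by omega)
        ⟨r + 3, by omega, by omega, p3⟩
    · exact pv_gut_back hlt r (r + 1) (r + 3) h0 h4 p1 p3 (by omega) (by omega) (by omega)
        ⟨r + 2, by omega, by omega, p2⟩
    · exfalso; norm_num [p1, p2, p3] at hsum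
    · exact pv_gut_back hlt r (r + 2) (r + 3) h0 h4 p2 p3 (by omega) (by omega) (by omega)
        ⟨r + 1, by omega, by omega, p1⟩
    · exfalso; norm_num [p1, p2, p3] at hsum
    · exfalso; norm_num [p1, p2, p3] at hsum
    · exfalso; norm_num [p1, p2, p3] at hsum

lemma pv_condOpen_char (L : List Int) (hnd : L.Nodup) (k : Nat) (hk : k + 3 < L.length) :
    pvCondOpen L (k : Int) = true ↔ L[k + 3]'hk = L[k]'(by omega) + 3 := by
  have h3 : ((k : Int) + 3) = ((k + 3 : Nat) : Int) := by push_cast; ring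
  have hsl : PySem.List.slice L (some (k : Int)) (some ((k : Int) + 4)) = (L.drop k).take 4 := by
    rw [show ((k : Int) + 4) = ((k : Int) + ((4 : Nat) : Int)) by norm_num,
      PySem.List.slice_natCast_add]
  have hT : ((L.drop k).take 4).Nodup :=
    (((L.drop k).take_sublist 4).trans (L.drop_sublist k)).nodup hnd
  have hlen : ((L.drop k).take 4).length = 4 := by
    simp only [List.length_take, List.length_drop]; omega
  simp only [pvCondOpen, pvSpan, h3, PySem.List.pyGetD_natCast, hsl,
    PySem.Set.ofList_eq_self_of_nodup _ hT, hlen]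
  rw [List.getD_eq_getElem _ _ hk, List.getD_eq_getElem _ _ (show k < L.length by omega)]
  simp only [Bool.and_eq_true, beq_iff_eq, beq_self_eq_true, and_true]
  omega

lemma pv_condGut_char (L : List Int) (k : Nat) (hk : k + 3 < L.length) :
    pvCondGut L (k : Int) = true ↔ L[k + 3]'hk = L[k]'(by omega) + 4 := by
  have h3 : ((k : Int) + 3) = ((k + 3 : Nat) : Int) := by push_cast; ring
  simp only [pvCondGut, pvSpan, h3, PySem.List.pyGetD_natCast]
  rw [List.getD_eq_getElem _ _ hk, List.getD_eq_getElem _ _ (show k < L.length by omega)]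
  simp only [beq_iff_eq]
  omega

-- the straight-draw core: A's scan over the sorted distinct ranks equals B's rank-range scan
lemma pv_core (S : List Int) (hnd : S.Nodup) (hb : ∀ x ∈ S, 1 ≤ x ∧ x ≤ 14) :
    ((PySem.List.pyRange 0
        (PySem.List.len (PySem.List.sorted S (fun x => x) false) - 3) 1).any
        (pvCondOpen (PySem.List.sorted S (fun x => x) false))
      = (PySem.List.pyRange 1 12 1).any (fun r =>
          (PySem.List.pyRange 0 4 1).all (fun k => PySem.Set.contains S (r + k))))
    ∧ ((PySem.List.pyRange 0
        (PySem.List.len (PySem.List.sorted S (fun x => x) false) - 3) 1).any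
        (fun i => !pvCondOpen (PySem.List.sorted S (fun x => x) false) i
          && pvCondGut (PySem.List.sorted S (fun x => x) false) i)
      = (PySem.List.pyRange 1 11 1).any (fun r =>
          PySem.Set.contains S r && PySem.Set.contains S (r + 4) &&
            ((([r + 1, r + 2, r + 3] : List Int).map
                (fun k => if PySem.Set.contains S k then (1 : Int) else 0)).sum == 2))) := by
  set L := PySem.List.sorted S (fun x => x) false with hLdef
  have hperm : L.Perm S := PySem.List.sorted_perm S (fun x => x) false
  have hnodL : L.Nodup := hperm.nodup_iff.mpr hnd
  have hle : L.Pairwise (fun a b => a ≤ b) := PySem.List.sorted_pairwise S (fun x => x)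
  have hlt : L.Pairwise (· < ·) := (hle.and hnodL).imp (fun h => lt_of_le_of_ne h.1 h.2)
  have hmem : ∀ x : Int, x ∈ S ↔ x ∈ L := fun x => hperm.mem_iff.symm
  have hbL : ∀ x ∈ L, 1 ≤ x ∧ x ≤ 14 := fun x hx => hb x (hperm.subset hx)
  have hwin : ∀ (k : Nat) (hk : k + 3 < L.length),
      (((!pvCondOpen L (k : Int)) = true) ∧ (pvCondGut L (k : Int) = true))
        ↔ L[k + 3]'hk = L[k]'(by omega) + 4 := by
    intro k hk
    rw [Bool.not_eq_true', pv_condGut_char L k hk]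
    constructor
    · rintro ⟨-, h⟩; exact h
    · intro h
      refine ⟨?_, h⟩
      cases hco : pvCondOpen L (k : Int) with
      | false => rfl
      | true =>
        exfalso
        have := (pv_condOpen_char L hnodL k hk).mp hco
        omega
  constructor
  · apply Bool.eq_iff_iff.mpr
    simp only [List.any_eq_true, List.all_eq_true, PySem.List.mem_pyRange_one,
      PySem.Set.contains_iff, PySem.List.len_eq, hmem]
    constructor
    · rintro ⟨i, ⟨hi0, hi1⟩, hcond⟩
      have hk : i.toNat + 3 < L.length := by omega
      rw [show i = ((i.toNat : Nat) : Int) by omega] at hcond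
      obtain ⟨r, hr1, hr2, m0, m1, m2, m3⟩ := (pv_open_iff hlt hbL).mp
        ⟨i.toNat, hk, (pv_condOpen_char L hnodL i.toNat hk).mp hcond⟩
      refine ⟨r, ⟨hr1, hr2⟩, ?_⟩
      intro x hx
      have hx4 : x = 0 ∨ x = 1 ∨ x = 2 ∨ x = 3 := by omega
      rcases hx4 with rfl | rfl | rfl | rfl
      · simpa using m0
      · exact m1
      · exact m2
      · exact m3
    · rintro ⟨r, ⟨hr1, hr2⟩, hall⟩
      have m0 : r ∈ L := by simpa using hall 0 ⟨by omega, by omega⟩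
      have m1 : r + 1 ∈ L := hall 1 ⟨by omega, by omega⟩
      have m2 : r + 2 ∈ L := hall 2 ⟨by omega, by omega⟩
      have m3 : r + 3 ∈ L := hall 3 ⟨by omega, by omega⟩
      obtain ⟨k, hk, he⟩ := (pv_open_iff hlt hbL).mpr ⟨r, hr1, hr2, m0, m1, m2, m3⟩
      exact ⟨(k : Int), ⟨by omega, by omega⟩,
        (pv_condOpen_char L hnodL k hk).mpr he⟩
  · apply Bool.eq_iff_iff.mpr
    simp only [List.any_eq_true, PySem.List.mem_pyRange_one, Bool.and_eq_true,
      PySem.Set.contains_iff, PySem.List.len_eq, hmem, List.map_cons, List.map_nil,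
      List.sum_cons, List.sum_nil, add_zero, beq_iff_eq]
    constructor
    · rintro ⟨i, ⟨hi0, hi1⟩, hcond⟩
      have hk : i.toNat + 3 < L.length := by omega
      rw [show i = ((i.toNat : Nat) : Int) by omega] at hcond
      obtain ⟨r, hr1, hr2, m0, m4, hsum⟩ := (pv_gut_iff hlt hbL).mp
        ⟨i.toNat, hk, (hwin i.toNat hk).mp hcond⟩
      exact ⟨r, ⟨hr1, hr2⟩, ⟨m0, m4⟩, hsum⟩
    · rintro ⟨r, ⟨hr1, hr2⟩, ⟨m0, m4⟩, hsum⟩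
      obtain ⟨k, hk, he⟩ := (pv_gut_iff hlt hbL).mpr ⟨r, hr1, hr2, m0, m4, hsum⟩
      exact ⟨(k : Int), ⟨by omega, by omega⟩, (hwin k hk).mpr he⟩

-- every rank value produced under Pre_ lies in [1, 14]
lemma pv_rank_char (x : Char) (hx : x ∈ ".23456789TJQKA".toList) :
    1 ≤ RANKS_py.getD x 0 ∧ RANKS_py.getD x 0 ≤ 14 := by
  rw [show ".23456789TJQKA".toList
      = ['.', '2', '3', '4', '5', '6', '7', '8', '9', 'T', 'J', 'Q', 'K', 'A'] from rfl] at hx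
  fin_cases hx <;> exact ⟨by decide, by decide⟩

-- ===== VERDICT (by name: the statement is the Claim_ definition above) =====
theorem detect_draws_py_spec : Claim_equal_detect_draws_py := by
  intro hole board _ hpre
  show detect_draws_py hole board = detect_draws_py_alt hole board
  have hflat : [hole.toList, board.toList].flatMap pvChunks
      = pvChunks hole.toList ++ pvChunks board.toList := by
    simp
  have hndS : (PySem.Set.ofList
      (((pvChunks hole.toList ++ pvChunks board.toList).filter (fun c => c.length == 2)).map
        (fun c => RANKS_py.getD (PySem.List.pyGetD c 0 ' ') 0))).Nodup :=
    PySem.Set.nodup_ofList _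
  have hbS : ∀ x ∈ PySem.Set.ofList
      (((pvChunks hole.toList ++ pvChunks board.toList).filter (fun c => c.length == 2)).map
        (fun c => RANKS_py.getD (PySem.List.pyGetD c 0 ' ') 0)), 1 ≤ x ∧ x ≤ 14 := by
    intro x hx
    rw [PySem.Set.mem_ofList] at hx
    obtain ⟨c, hc, rfl⟩ := List.mem_map.mp hx
    obtain ⟨hcm, hcl⟩ := List.mem_filter.mp hc
    exact pv_rank_char _ (hpre c hcm (by simpa using hcl))
  have hcore := pv_core _ hndS hbS
  unfold detect_draws_py detect_draws_py_alt
  simp only [hflat]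
  rw [PySem.List.foldl_if_eq_foldl_filter, pv_fold_two]
  simp only [Bool.false_or, hcore.1, hcore.2, List.any_beq']
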